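-- pv_equiv track=rewrite | github.com/imarest3/cs2 | exam_2.py | all_positive
-- ===== SOURCE A (Python) =====
-- def all_positive(lst, index=0):
--     #if len (lst) == 0:
--      #   return False
--
--     if not lst:
--         return False
--
--
--     elif index == len(lst):
--         return True
--     elif lst[index] <= 0:
--         return False
--     else:
--         return all_positive(lst, index + 1)
-- ===== SOURCE B (Python) =====
-- def all_positive(lst, index=0):
--     if not lst:
--         return False
--     start = index if index > 0 else 0
--     return all(x > 0 for x in lst[start:])
-- ===== Notes on version B (the rewrite author's own statement) =====
-- stated objective: simpler
-- what changed: Replaces A's element-by-element index recursion with an empty-list guard followed by a single flat scan of the slice lst[max(index,0):] with all(x > 0 ...).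
import Mathlib
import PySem

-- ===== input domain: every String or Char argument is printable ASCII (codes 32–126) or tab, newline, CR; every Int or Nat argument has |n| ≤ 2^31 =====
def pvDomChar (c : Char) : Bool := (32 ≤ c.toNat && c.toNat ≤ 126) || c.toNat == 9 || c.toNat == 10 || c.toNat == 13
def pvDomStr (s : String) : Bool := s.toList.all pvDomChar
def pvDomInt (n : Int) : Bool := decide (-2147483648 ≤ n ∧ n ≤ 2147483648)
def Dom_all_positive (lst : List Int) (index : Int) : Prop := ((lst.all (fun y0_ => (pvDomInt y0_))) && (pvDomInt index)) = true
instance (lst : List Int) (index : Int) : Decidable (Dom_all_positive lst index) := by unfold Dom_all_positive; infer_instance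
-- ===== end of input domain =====

-- B replaces A's index recursion by an empty-list guard plus a flat scan of the slice lst[start:]
-- (start = max(index,0)); objective: simpler.


-- ===== PORT A =====
-- literal transliteration of A's index recursion; pyGet? = none is Python's IndexError,
-- excluded by Pre_all_positive (the 'false' there is never claimed about)
def all_positive (lst : List Int) (index : Int) : Bool :=
  if lst = [] then false
  else if index = PySem.List.len lst then true
  else
    match h : PySem.List.pyGet? lst index with
    | none => false
    | some x =>
      if x ≤ 0 then false
      else all_positive lst (index + 1)
termination_by (PySem.List.len lst + 1 - index).toNat
decreasing_by
  have h2 : ¬ PySem.List.pyGet? lst index = none := by simp [h]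
  rw [PySem.List.pyGet?_eq_none_iff] at h2
  unfold PySem.Raise.InRange at h2
  simp [PySem.List.len_eq]
  omega

-- ===== PORT B =====
def all_positive_alt (lst : List Int) (index : Int) : Bool :=
  if lst = [] then false
  else
    let start := if index > 0 then index else 0
    (PySem.List.slice lst (some start) none).all (fun x => 0 < x)

-- ===== PRECONDITION & SPEC =====
-- Pre_ excludes exactly the inputs where A raises IndexError: a nonempty list with a start
-- index outside [-len(lst), len(lst)].
def Pre_all_positive (lst : List Int) (index : Int) : Prop :=
  lst = [] ∨ (-(lst.length : Int) ≤ index ∧ index ≤ lst.length)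
instance (lst : List Int) (index : Int) : Decidable (Pre_all_positive lst index) := by
  unfold Pre_all_positive; infer_instance
def pvWitness_all_positive : List Int × Int := ([1, 2], 0)

def Spec_all_positive (lst : List Int) (index : Int) (out : Bool) : Prop := out = all_positive_alt lst index
instance (lst : List Int) (index : Int) (out : Bool) : Decidable (Spec_all_positive lst index out) := by unfold Spec_all_positive; infer_instance

-- ===== CLAIM (what is proved, stated in full; the proofs are below) =====
def Claim_equal_all_positive : Prop := ∀ (lst : List Int) (index : Int), Dom_all_positive lst index → Pre_all_positive lst index → Spec_all_positive lst index (all_positive lst index)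

-- ===== LEMMAS AND PROOFS =====

-- A started at a nonnegative in-range index is the positivity scan of the suffix.
theorem allpos_nonneg (lst : List Int) (k : Nat) (hne : lst ≠ []) (hk : k ≤ lst.length) :
    all_positive lst (k : Int) = (lst.drop k).all (fun x => 0 < x) := by
  induction hn : lst.length - k generalizing k with
  | zero =>
    have hkl : k = lst.length := by omega
    subst hkl
    unfold all_positive
    simp [hne, PySem.List.len_eq, List.drop_length]
  | succ n ih =>
    have hlt : k < lst.length := by omega
    unfold all_positive
    have hget : PySem.List.pyGet? lst (k : Int) = some lst[k] := by
      rw [PySem.List.pyGet?_natCast]; simp [hlt]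
    rw [hget]
    have hdrop : lst.drop k = lst[k] :: lst.drop (k + 1) := List.drop_eq_getElem_cons hlt
    have hneq : (k : Int) ≠ PySem.List.len lst := by
      rw [PySem.List.len_eq]; omega
    simp only [hne, hneq, if_false]
    split
    · next hle =>
      rw [hdrop]
      simp only [List.all_cons]
      have hd : decide (0 < lst[k]) = false := by simp; omega
      rw [hd]; simp
    · next hgt =>
      rw [show ((k : Int) + 1) = ((k + 1 : Nat) : Int) from by push_cast; ring,
          ih (k + 1) (by omega) (by omega), hdrop]
      simp only [List.all_cons]
      have hd : decide (0 < lst[k]) = true := by simp; omega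
      rw [hd]; simp

-- A started at a nonpositive in-range index is the positivity scan of the whole list.
theorem allpos_neg (lst : List Int) (index : Int) (hne : lst ≠ [])
    (hlo : -(lst.length : Int) ≤ index) (hhi : index ≤ 0) :
    all_positive lst index = lst.all (fun x => 0 < x) := by
  induction hn : (-index).toNat generalizing index with
  | zero =>
    have h0 : index = 0 := by omega
    subst h0
    have := allpos_nonneg lst 0 hne (by omega)
    simpa using this
  | succ n ih =>
    have hneg : index < 0 := by omega
    unfold all_positive
    have hneq : index ≠ PySem.List.len lst := by
      rw [PySem.List.len_eq]
      have : 0 < lst.length := List.length_pos_of_ne_nil hne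
      omega
    obtain ⟨x, hx⟩ : ∃ x, PySem.List.pyGet? lst index = some x := by
      cases h : PySem.List.pyGet? lst index with
      | none =>
        rw [PySem.List.pyGet?_eq_none_iff] at h
        unfold PySem.Raise.InRange at h
        exact absurd (by omega) h
      | some x => exact ⟨x, rfl⟩
    rw [hx]
    simp only [hneq, if_false, if_neg (show ¬ lst = [] from hne)]
    have hmem : x ∈ lst := PySem.List.mem_of_pyGet?_eq_some (h := hx)
    split
    · next hle =>
      symm
      rw [List.all_eq_false]
      exact ⟨x, hmem, by simpa using (by omega : ¬ 0 < x)⟩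
    · next hgt =>
      exact ih (index + 1) (by omega) (by omega) (by omega)

-- lst[s:] for a nonnegative Int s is List.drop.
theorem slice_from_nonneg (lst : List Int) (s : Int) (hs : 0 ≤ s) :
    PySem.List.slice lst (some s) none = lst.drop s.toNat := by
  conv_lhs => rw [show s = ((s.toNat : Nat) : Int) from by omega]
  rw [PySem.List.slice_from_natCast]

-- B equals the positivity scan of the suffix from max(index,0).
theorem alt_eq_drop (lst : List Int) (index : Int) (hne : lst ≠ []) :
    all_positive_alt lst index =
      (lst.drop (if index > 0 then index.toNat else 0)).all (fun x => 0 < x) := by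
  unfold all_positive_alt
  simp only [if_neg hne]
  rw [slice_from_nonneg lst _ (by split <;> omega)]
  have h2 : (if index > 0 then index else 0).toNat = if index > 0 then index.toNat else 0 := by
    split <;> simp
  rw [h2]

-- ===== VERDICT (by name: the statement is the Claim_ definition above) =====
theorem all_positive_spec : Claim_equal_all_positive := by
  intro lst index _ hpre
  unfold Spec_all_positive
  by_cases hne : lst = []
  · subst hne
    unfold all_positive all_positive_alt
    simp
  · rcases hpre with h | ⟨hlo, hhi⟩
    · exact absurd h hne
    · rw [alt_eq_drop lst index hne]
      by_cases hpos : index > 0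
      · rw [if_pos hpos]
        conv_lhs => rw [show index = ((index.toNat : Nat) : Int) from by omega]
        exact allpos_nonneg lst index.toNat hne (by omega)
      · rw [if_neg hpos, allpos_neg lst index hne hlo (by omega)]
        simp
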